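-- pv_equiv track=rewrite | github.com/rahulon001/python_programs | consecutive_one.py | check_consecutive_ones
-- ===== SOURCE A (Python) =====
-- from collections import Counter
--
-- def check_consecutive_ones(arr):
--     f = Counter(arr)[1]
--     c,c1 = 0, 0
--     for i in range(len(arr)):
--         if arr[i] != 1:
--             c += 1
--         else:
--             break
--
--     for j in range(c, len(arr)):
--         if arr[j] == 1:
--             c1 += 1
--         else:
--             break
--
--     if c1 == f:
--         return True
--     else:
--         return False
-- ===== SOURCE B (Python) =====
-- def check_consecutive_ones(arr):
--     groups = 0
--     prev_is_one = False
--     for x in arr: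
--         is_one = (x == 1)
--         if is_one and not prev_is_one:
--             groups += 1
--         prev_is_one = is_one
--     return groups <= 1
-- ===== Notes on version B (the rewrite author's own statement) =====
-- stated objective: simpler
-- what changed: Replaced A's Counter plus two index-based scan loops (total 1-count vs first-run length) with one left-to-right pass that counts maximal runs of 1s and returns groups <= 1.
import Mathlib
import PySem

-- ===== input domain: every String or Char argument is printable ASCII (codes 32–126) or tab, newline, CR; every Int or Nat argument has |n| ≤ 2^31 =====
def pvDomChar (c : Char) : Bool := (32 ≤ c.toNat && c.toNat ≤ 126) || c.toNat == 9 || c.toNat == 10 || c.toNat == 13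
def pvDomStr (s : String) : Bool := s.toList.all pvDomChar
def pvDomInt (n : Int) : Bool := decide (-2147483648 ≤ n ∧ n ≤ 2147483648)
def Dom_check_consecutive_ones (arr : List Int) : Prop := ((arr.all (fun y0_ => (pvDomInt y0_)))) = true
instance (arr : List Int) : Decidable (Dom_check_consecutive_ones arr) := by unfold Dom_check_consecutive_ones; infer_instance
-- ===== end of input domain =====

-- B replaces A's Counter plus two scan loops by one pass counting maximal runs of 1s (simpler).

-- ===== PORT A =====
-- first loop: count leading non-1 elements (break at first 1)
def pvALoop1 : List Int → Nat
  | [] => 0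
  | x :: xs => if x ≠ 1 then 1 + pvALoop1 xs else 0

-- second loop: count run of 1s from position c (break at first non-1)
def pvALoop2 : List Int → Nat
  | [] => 0
  | x :: xs => if x = 1 then 1 + pvALoop2 xs else 0

def check_consecutive_ones (arr : List Int) : Bool :=
  let f := arr.count 1          -- Counter(arr)[1]
  let c := pvALoop1 arr
  let c1 := pvALoop2 (arr.drop c)
  if c1 = f then true else false

-- ===== PORT B =====
def pvBLoop : List Int → Bool → Nat → Nat
  | [], _, groups => groups
  | x :: xs, prev, groups =>
    let isOne := x == 1
    pvBLoop xs isOne (if isOne && !prev then groups + 1 else groups)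

def check_consecutive_ones_alt (arr : List Int) : Bool :=
  decide (pvBLoop arr false 0 ≤ 1)

-- ===== PRECONDITION & SPEC =====
def Spec_check_consecutive_ones (arr : List Int) (out : Bool) : Prop := out = check_consecutive_ones_alt arr
instance (arr : List Int) (out : Bool) : Decidable (Spec_check_consecutive_ones arr out) := by unfold Spec_check_consecutive_ones; infer_instance

-- ===== CLAIM (what is proved, stated in full; the proofs are below) =====
def Claim_equal_check_consecutive_ones : Prop := ∀ (arr : List Int), Dom_check_consecutive_ones arr → Spec_check_consecutive_ones arr (check_consecutive_ones arr)

-- ===== LEMMAS AND PROOFS =====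
theorem pvBLoop_ge (xs : List Int) : ∀ (prev : Bool) (n : Nat), n ≤ pvBLoop xs prev n := by
  induction xs with
  | nil => intro prev n; simp [pvBLoop]
  | cons x xs ih =>
    intro prev n
    simp only [pvBLoop]
    split
    · exact le_trans (Nat.le_succ n) (ih _ _)
    · exact ih _ _

theorem pvBLoop_false_eq (xs : List Int) : ∀ (n : Nat), (pvBLoop xs false n = n ↔ xs.count 1 = 0) := by
  induction xs with
  | nil => intro n; simp [pvBLoop, List.count_nil]
  | cons x xs ih =>
    intro n
    by_cases hx : x = 1
    · subst hx
      simp only [pvBLoop, BEq.rfl, Bool.not_false, Bool.and_self, if_pos]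
      constructor
      · intro h
        have := pvBLoop_ge xs true (n + 1)
        omega
      · intro h; simp at h
    · have hbeq : (x == (1 : Int)) = false := by simp [hx]
      simp only [pvBLoop, hbeq, Bool.false_and, if_neg Bool.false_ne_true]
      rw [ih n]
      simp [hx]

theorem pvBLoop_true_eq (xs : List Int) : ∀ (n : Nat), (pvBLoop xs true n = n ↔ pvALoop2 xs = xs.count 1) := by
  induction xs with
  | nil => intro n; simp [pvBLoop, pvALoop2, List.count_nil]
  | cons x xs ih =>
    intro n
    by_cases hx : x = 1
    · subst hx
      simp only [pvBLoop, BEq.rfl, Bool.not_true, Bool.and_false, if_neg Bool.false_ne_true]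
      rw [ih n]
      have h2 : pvALoop2 ((1:Int) :: xs) = 1 + pvALoop2 xs := by simp [pvALoop2]
      have h3 : List.count (1:Int) ((1:Int) :: xs) = List.count 1 xs + 1 := by
        simp [List.count_cons]
      rw [h2, h3]
      omega
    · have hbeq : (x == (1 : Int)) = false := by simp [hx]
      simp only [pvBLoop, hbeq, Bool.false_and, if_neg Bool.false_ne_true]
      rw [pvBLoop_false_eq]
      have h2 : pvALoop2 (x :: xs) = 0 := by simp [pvALoop2, hx]
      have h3 : List.count (1:Int) (x :: xs) = List.count 1 xs := by
        rw [List.count_cons, hbeq]; simp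
      rw [h2, h3]
      omega

theorem main_eq (arr : List Int) : check_consecutive_ones arr = check_consecutive_ones_alt arr := by
  induction arr with
  | nil => decide
  | cons x xs ih =>
    by_cases hx : x = 1
    · subst hx
      simp only [check_consecutive_ones, check_consecutive_ones_alt, pvALoop1, pvBLoop,
        BEq.rfl, Bool.not_false, Bool.and_self, if_pos, ite_not, List.drop_zero,
        pvALoop2, List.count_cons]
      have h1 : pvBLoop xs true 1 ≤ 1 ↔ pvBLoop xs true 1 = 1 := by
        have := pvBLoop_ge xs true 1; omega
      have h2 := pvBLoop_true_eq xs 1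
      by_cases hc : pvALoop2 xs = xs.count 1
      · have h4 : pvBLoop xs true 1 = 1 := h2.mpr hc
        have hcond : 1 + pvALoop2 xs = List.count 1 xs + 1 := by omega
        rw [if_pos hcond]
        simp [h4]
      · have : pvBLoop xs true 1 ≠ 1 := fun h => hc (h2.mp h)
        have hne : ¬ (1 + pvALoop2 xs = xs.count 1 + 1) := by omega
        rw [if_neg hne]
        simp [h1, this]
    · have hbeq : (x == (1 : Int)) = false := by simp [hx]
      have ha : check_consecutive_ones (x :: xs) = check_consecutive_ones xs := by
        simp only [check_consecutive_ones, pvALoop1, if_pos hx,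
          Nat.add_comm 1 (pvALoop1 xs), List.drop_succ_cons]
        simp [hx]
      have hb : check_consecutive_ones_alt (x :: xs) = check_consecutive_ones_alt xs := by
        simp only [check_consecutive_ones_alt, pvBLoop, hbeq, Bool.false_and,
          if_neg Bool.false_ne_true]
      rw [ha, hb, ih]

-- ===== VERDICT (by name: the statement is the Claim_ definition above) =====
theorem check_consecutive_ones_spec : Claim_equal_check_consecutive_ones := by
  intro arr _
  unfold Spec_check_consecutive_ones
  exact main_eq arr
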